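-- pv_equiv track=rewrite | github.com/AlexArutiunian/drl | feats_joints.py | _roi_indices
-- ===== SOURCE A (Python) =====
-- from typing import List, Optional, Tuple, Set, Dict
--
-- def _roi_indices(names: List[str]) -> Dict[str, List[int]]:
--     groups = {"ankle_foot":[], "knee":[], "thigh":[], "shin_calf":[], "pelvis":[]}
--     for i, nm in enumerate(names):
--         s = nm.lower()
--         if "ankle" in s or "foot" in s: groups["ankle_foot"].append(i)
--         if "knee"  in s: groups["knee"].append(i)
--         if "thigh" in s: groups["thigh"].append(i)
--         if "shin"  in s or "calf" in s: groups["shin_calf"].append(i)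
--         if "pelvis" in s or "hip" in s: groups["pelvis"].append(i)
--     return groups
-- ===== SOURCE B (Python) =====
-- def _roi_indices(names):
--     SPEC = {
--         "ankle_foot": ("ankle", "foot"),
--         "knee": ("knee",),
--         "thigh": ("thigh",),
--         "shin_calf": ("shin", "calf"),
--         "pelvis": ("pelvis", "hip"),
--     }
--     return {g: [i for i, nm in enumerate(names)
--                 if any(kw in nm.lower() for kw in kws)]
--             for g, kws in SPEC.items()}
-- ===== Notes on version B (the rewrite author's own statement) =====
-- stated objective: simpler
-- what changed: Replaces A's single simultaneous pass that mutates five lists inside a dict with a data-driven keyword table (group -> keywords) and a per-group comprehension scan over the names, built as one dict comprehension.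
import Mathlib
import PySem

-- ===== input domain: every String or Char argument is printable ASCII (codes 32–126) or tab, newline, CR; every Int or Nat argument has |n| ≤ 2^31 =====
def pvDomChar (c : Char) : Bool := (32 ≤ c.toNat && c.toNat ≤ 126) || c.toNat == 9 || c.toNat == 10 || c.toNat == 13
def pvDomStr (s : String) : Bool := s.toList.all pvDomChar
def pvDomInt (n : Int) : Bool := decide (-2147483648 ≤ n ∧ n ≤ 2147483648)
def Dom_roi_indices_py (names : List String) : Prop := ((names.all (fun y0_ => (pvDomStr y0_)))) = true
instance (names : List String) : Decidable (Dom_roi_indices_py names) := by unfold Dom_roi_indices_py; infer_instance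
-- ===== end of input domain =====

-- B restructures A's single mutating pass into a keyword table mapped with one per-group scan (objective: simpler).

-- ===== PORT A =====
-- one loop body step of A: appends i to each group whose keyword matches s = nm.lower()
def roiStepA (g : PySem.Dict String (List Int)) (p : Int × String) : PySem.Dict String (List Int) :=
  let s := PySem.Str.lower p.2
  let g := if PySem.Str.isIn "ankle" s || PySem.Str.isIn "foot" s then g.modify "ankle_foot" [] (· ++ [p.1]) else g
  let g := if PySem.Str.isIn "knee" s then g.modify "knee" [] (· ++ [p.1]) else g
  let g := if PySem.Str.isIn "thigh" s then g.modify "thigh" [] (· ++ [p.1]) else g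
  let g := if PySem.Str.isIn "shin" s || PySem.Str.isIn "calf" s then g.modify "shin_calf" [] (· ++ [p.1]) else g
  let g := if PySem.Str.isIn "pelvis" s || PySem.Str.isIn "hip" s then g.modify "pelvis" [] (· ++ [p.1]) else g
  g

def roi_indices_py (names : List String) : List (String × List Int) :=
  let g0 : PySem.Dict String (List Int) :=
    PySem.Dict.ofList [("ankle_foot", []), ("knee", []), ("thigh", []), ("shin_calf", []), ("pelvis", [])]
  ((PySem.List.enumerate names).foldl roiStepA g0).items

-- ===== PORT B =====
def roiSpec : List (String × List String) :=
  [("ankle_foot", ["ankle", "foot"]), ("knee", ["knee"]), ("thigh", ["thigh"]),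
   ("shin_calf", ["shin", "calf"]), ("pelvis", ["pelvis", "hip"])]

def roi_indices_py_alt (names : List String) : List (String × List Int) :=
  roiSpec.map (fun gk =>
    (gk.1, (PySem.List.enumerate names).filterMap (fun p =>
      if gk.2.any (fun kw => PySem.Str.isIn kw (PySem.Str.lower p.2)) then some p.1 else none)))

-- ===== PRECONDITION & SPEC =====
def Spec_roi_indices_py (names : List String) (out : List (String × List Int)) : Prop := out = roi_indices_py_alt names
instance (names : List String) (out : List (String × List Int)) : Decidable (Spec_roi_indices_py names out) := by unfold Spec_roi_indices_py; infer_instance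

-- ===== CLAIM (what is proved, stated in full; the proofs are below) =====
def Claim_equal_roi_indices_py : Prop := ∀ (names : List String), Dom_roi_indices_py names → Spec_roi_indices_py names (roi_indices_py names)

-- ===== LEMMAS AND PROOFS =====

-- the per-group selector B computes
def roiSel (kws : List String) (l : List (Int × String)) : List Int :=
  l.filterMap (fun p => if kws.any (fun kw => PySem.Str.isIn kw (PySem.Str.lower p.2)) then some p.1 else none)

def roiMk (a b c d e : List Int) : PySem.Dict String (List Int) :=
  PySem.Dict.mk [("ankle_foot", a), ("knee", b), ("thigh", c), ("shin_calf", d), ("pelvis", e)]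

lemma roiMk_modify_af (i : Int) (a b c d e : List Int) :
    (roiMk a b c d e).modify "ankle_foot" [] (· ++ [i]) = roiMk (a ++ [i]) b c d e := by
  simp [roiMk, PySem.Dict.modify, PySem.Dict.insert, PySem.Dict.contains,
    PySem.Dict.getD_eq_get?_getD, PySem.Dict.get?_mk_cons]

lemma roiMk_modify_kn (i : Int) (a b c d e : List Int) :
    (roiMk a b c d e).modify "knee" [] (· ++ [i]) = roiMk a (b ++ [i]) c d e := by
  simp [roiMk, PySem.Dict.modify, PySem.Dict.insert, PySem.Dict.contains,
    PySem.Dict.getD_eq_get?_getD, PySem.Dict.get?_mk_cons]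

lemma roiMk_modify_th (i : Int) (a b c d e : List Int) :
    (roiMk a b c d e).modify "thigh" [] (· ++ [i]) = roiMk a b (c ++ [i]) d e := by
  simp [roiMk, PySem.Dict.modify, PySem.Dict.insert, PySem.Dict.contains,
    PySem.Dict.getD_eq_get?_getD, PySem.Dict.get?_mk_cons]

lemma roiMk_modify_sc (i : Int) (a b c d e : List Int) :
    (roiMk a b c d e).modify "shin_calf" [] (· ++ [i]) = roiMk a b c (d ++ [i]) e := by
  simp [roiMk, PySem.Dict.modify, PySem.Dict.insert, PySem.Dict.contains,
    PySem.Dict.getD_eq_get?_getD, PySem.Dict.get?_mk_cons]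

lemma roiMk_modify_pv (i : Int) (a b c d e : List Int) :
    (roiMk a b c d e).modify "pelvis" [] (· ++ [i]) = roiMk a b c d (e ++ [i]) := by
  simp [roiMk, PySem.Dict.modify, PySem.Dict.insert, PySem.Dict.contains,
    PySem.Dict.getD_eq_get?_getD, PySem.Dict.get?_mk_cons]

lemma roiStepA_mk (i : Int) (nm : String) (a b c d e : List Int) :
    roiStepA (roiMk a b c d e) (i, nm) =
      roiMk (a ++ if ["ankle", "foot"].any (fun kw => PySem.Str.isIn kw (PySem.Str.lower nm)) then [i] else [])
            (b ++ if ["knee"].any (fun kw => PySem.Str.isIn kw (PySem.Str.lower nm)) then [i] else [])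
            (c ++ if ["thigh"].any (fun kw => PySem.Str.isIn kw (PySem.Str.lower nm)) then [i] else [])
            (d ++ if ["shin", "calf"].any (fun kw => PySem.Str.isIn kw (PySem.Str.lower nm)) then [i] else [])
            (e ++ if ["pelvis", "hip"].any (fun kw => PySem.Str.isIn kw (PySem.Str.lower nm)) then [i] else []) := by
  simp only [roiStepA, List.any_cons, List.any_nil, Bool.or_false]
  by_cases h1 : (PySem.Str.isIn "ankle" (PySem.Str.lower nm) || PySem.Str.isIn "foot" (PySem.Str.lower nm)) = true <;>
  by_cases h2 : PySem.Str.isIn "knee" (PySem.Str.lower nm) = true <;>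
  by_cases h3 : PySem.Str.isIn "thigh" (PySem.Str.lower nm) = true <;>
  by_cases h4 : (PySem.Str.isIn "shin" (PySem.Str.lower nm) || PySem.Str.isIn "calf" (PySem.Str.lower nm)) = true <;>
  by_cases h5 : (PySem.Str.isIn "pelvis" (PySem.Str.lower nm) || PySem.Str.isIn "hip" (PySem.Str.lower nm)) = true <;>
  simp only [h1, h2, h3, h4, h5, if_pos, if_neg, Bool.not_eq_true,
    roiMk_modify_af, roiMk_modify_kn, roiMk_modify_th, roiMk_modify_sc, roiMk_modify_pv,
    List.append_nil]

lemma roiSel_cons (kws : List String) (i : Int) (nm : String) (l : List (Int × String)) :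
    roiSel kws ((i, nm) :: l) =
      (if kws.any (fun kw => PySem.Str.isIn kw (PySem.Str.lower nm)) then [i] else []) ++ roiSel kws l := by
  simp only [roiSel, List.filterMap_cons]
  split <;> rename_i heq <;> split_ifs at heq <;> simp_all

lemma roi_loop (l : List (Int × String)) (a b c d e : List Int) :
    l.foldl roiStepA (roiMk a b c d e) =
      roiMk (a ++ roiSel ["ankle", "foot"] l) (b ++ roiSel ["knee"] l) (c ++ roiSel ["thigh"] l)
            (d ++ roiSel ["shin", "calf"] l) (e ++ roiSel ["pelvis", "hip"] l) := by
  induction l generalizing a b c d e with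
  | nil => simp [roiSel]
  | cons p l ih =>
    obtain ⟨i, nm⟩ := p
    rw [List.foldl_cons, roiStepA_mk, ih]
    simp only [roiSel_cons, List.append_assoc]

theorem roi_indices_py_eq (names : List String) : roi_indices_py names = roi_indices_py_alt names := by
  show ((PySem.List.enumerate names).foldl roiStepA (roiMk [] [] [] [] [])).items = _
  rw [roi_loop]
  simp [roiMk, roi_indices_py_alt, roiSpec, roiSel]

-- ===== VERDICT (by name: the statement is the Claim_ definition above) =====
theorem roi_indices_py_spec : Claim_equal_roi_indices_py := by
  intro names _
  exact roi_indices_py_eq names
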